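-- pv_equiv track=rewrite | github.com/SoftFMTeam/PSRI | ccft.python/src/ccft/helper/neo4jcsv/neo4jcsv_functions.py | _get_successor_tree
-- ===== SOURCE A (Python) =====
-- def _find_successors(source, edges: tuple[dict[int, set], dict[int, set]], reverse: bool = False) -> list[int]:
--     if source in edges[0]:
--         successors = list((edges[0])[source])
--         successors.sort(reverse=reverse)
--         return successors
--     return []
--
-- def _get_successor_tree(start_id, edges: tuple[dict[int, set], dict[int, set]]) -> list[tuple[int, list[int]]]:
--     visited = set()
--     stack = [start_id]
--
--     tree = []
--
--     while stack:
--         node = stack.pop()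
--         if node in visited:
--             continue
--         visited.add(node)
--
--         successors = _find_successors(node, edges)
--         stack.extend(successors)
--         if len(successors):
--             tree.append((node, successors))
--
--     return tree
-- ===== SOURCE B (Python) =====
-- def _find_successors(source, edges, reverse=False):
--     if source in edges[0]:
--         successors = list((edges[0])[source])
--         successors.sort(reverse=reverse)
--         return successors
--     return []
--
-- def _get_successor_tree(start_id, edges):
--     visited = set()
--     tree = []
--
--     def visit(node):
--         if node in visited:
--             return
--         visited.add(node)
--         successors = _find_successors(node, edges)
--         if successors:
--             tree.append((node, successors))
--         for s in reversed(successors):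
--             visit(s)
--
--     visit(start_id)
--     return tree
-- ===== Notes on version B (the rewrite author's own statement) =====
-- stated objective: alternative
-- what changed: A's iterative explicit-stack loop with skip-if-visited-on-pop is replaced by a recursive DFS: a helper visit(node) marks on entry, records the node with its sorted successors, and recurses on the successors in descending order (matching A's LIFO pop order).
import Mathlib
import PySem

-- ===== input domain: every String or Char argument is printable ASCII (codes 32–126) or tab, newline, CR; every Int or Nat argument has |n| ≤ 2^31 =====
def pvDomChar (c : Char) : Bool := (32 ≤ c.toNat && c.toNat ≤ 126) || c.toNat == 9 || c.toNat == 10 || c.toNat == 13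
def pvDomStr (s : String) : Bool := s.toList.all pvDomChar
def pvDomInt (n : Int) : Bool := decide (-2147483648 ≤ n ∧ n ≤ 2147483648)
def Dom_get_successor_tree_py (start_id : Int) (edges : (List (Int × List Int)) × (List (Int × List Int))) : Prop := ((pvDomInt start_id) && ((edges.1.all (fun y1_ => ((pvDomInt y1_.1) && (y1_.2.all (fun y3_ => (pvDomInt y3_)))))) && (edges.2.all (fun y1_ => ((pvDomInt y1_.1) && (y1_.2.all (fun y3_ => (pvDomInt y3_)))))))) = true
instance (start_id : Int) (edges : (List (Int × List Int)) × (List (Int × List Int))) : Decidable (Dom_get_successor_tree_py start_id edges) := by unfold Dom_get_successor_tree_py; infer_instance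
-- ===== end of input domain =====

-- B replaces A's explicit-stack loop by a recursive DFS (mark-on-entry, children visited in
-- descending order); same return value, no observable mutation of the arguments.

-- ===== PORT A =====
-- _find_successors (shared helper of both Pythons): 'source in edges[0]' + '(edges[0])[source]'
-- is a first-match association-list lookup (dict keys are unique); 'list(set); .sort(reverse=r)'
-- is sorted(distinct elements) — exact regardless of Python's set iteration order.
def pvFindSuccessors (source : Int) (edges : (List (Int × List Int)) × (List (Int × List Int))) (reverse : Bool) : List Int :=
  match List.lookup source edges.1 with
  | some s => PySem.List.sorted s (fun x => x) reverse
  | none => []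

-- termination measure ingredients for port A's while-loop
def pvKeys (edges : (List (Int × List Int)) × (List (Int × List Int))) : List Int := edges.1.map Prod.fst
def pvU (edges : (List (Int × List Int)) × (List (Int × List Int))) (v : PySem.Set Int) : Nat :=
  ((pvKeys edges).filter (fun x => !(PySem.Set.contains v x))).length
def pvS (edges : (List (Int × List Int)) × (List (Int × List Int))) : Nat := (edges.1.map (fun p => p.2.length)).sum

lemma pvU_add_le (edges : (List (Int × List Int)) × (List (Int × List Int))) (v : PySem.Set Int) (n : Int) :
    pvU edges (PySem.Set.add v n) ≤ pvU edges v := by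
  apply List.Sublist.length_le
  apply List.monotone_filter_right
  intro a ha
  simp only [Bool.not_eq_eq_eq_not, Bool.not_true, PySem.Set.contains_eq_listContains] at *
  simp only [List.contains_eq_mem, decide_eq_false_iff_not] at *
  intro hmem; exact ha ((PySem.Set.mem_add _ _ _).mpr (Or.inl hmem))

lemma pvU_add_lt (edges : (List (Int × List Int)) × (List (Int × List Int))) (v : PySem.Set Int) (n : Int)
    (hk : n ∈ pvKeys edges) (hv : n ∉ v) :
    pvU edges (PySem.Set.add v n) < pvU edges v := by
  have hsub : ((pvKeys edges).filter (fun x => !(PySem.Set.contains (PySem.Set.add v n) x))).Sublist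
      ((pvKeys edges).filter (fun x => !(PySem.Set.contains v x))) := by
    apply List.monotone_filter_right
    intro a ha
    simp only [Bool.not_eq_eq_eq_not, Bool.not_true, PySem.Set.contains_eq_listContains,
      List.contains_eq_mem, decide_eq_false_iff_not] at *
    intro hmem; exact ha ((PySem.Set.mem_add _ _ _).mpr (Or.inl hmem))
  have hmem1 : n ∈ (pvKeys edges).filter (fun x => !(PySem.Set.contains v x)) := by
    simp [List.mem_filter, hk, hv]
  have hmem2 : n ∉ (pvKeys edges).filter (fun x => !(PySem.Set.contains (PySem.Set.add v n) x)) := by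
    intro hm
    have hq := (List.mem_filter.mp hm).2
    simp only [Bool.not_eq_eq_eq_not, Bool.not_true, PySem.Set.contains_eq_listContains,
      List.contains_eq_mem, decide_eq_false_iff_not] at hq
    exact hq ((PySem.Set.mem_add v n n).mpr (Or.inr rfl))
  have hle := hsub.length_le
  rcases Nat.lt_or_ge ((pvKeys edges).filter (fun x => !(PySem.Set.contains (PySem.Set.add v n) x))).length
      ((pvKeys edges).filter (fun x => !(PySem.Set.contains v x))).length with h | h
  · exact h
  · exact absurd (hsub.eq_of_length (Nat.le_antisymm hle h)) (by intro he; rw [he] at hmem2; exact hmem2 hmem1)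

lemma pv_lookup_mem {l : List (Int × List Int)} {n : Int} {s : List Int}
    (h : List.lookup n l = some s) : n ∈ l.map Prod.fst := by
  induction l with
  | nil => simp at h
  | cons p t ih =>
    obtain ⟨k, vv⟩ := p
    rw [List.lookup_cons] at h
    by_cases he : n = k
    · subst he; simp
    · have hb : (n == k) = false := by simpa using he
      simp only [hb] at h
      simp [ih h]

lemma pv_lookup_mem_keys {edges : (List (Int × List Int)) × (List (Int × List Int))} {n : Int} {s : List Int}
    (h : List.lookup n edges.1 = some s) : n ∈ pvKeys edges := by
  unfold pvKeys; exact pv_lookup_mem h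

lemma pv_lookup_len {l : List (Int × List Int)} {n : Int} {s : List Int}
    (h : List.lookup n l = some s) : s.length ≤ (l.map (fun p => p.2.length)).sum := by
  induction l with
  | nil => simp at h
  | cons p t ih =>
    obtain ⟨k, vv⟩ := p
    rw [List.lookup_cons] at h
    by_cases he : n = k
    · subst he
      simp only [beq_self_eq_true, Option.some.injEq] at h
      subst h
      simp
    · have hb : (n == k) = false := by simpa using he
      simp only [hb] at h
      simp only [List.map_cons, List.sum_cons]
      exact Nat.le_trans (ih h) (Nat.le_add_left _ _)

lemma pv_lookup_len_le {edges : (List (Int × List Int)) × (List (Int × List Int))} {n : Int} {s : List Int}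
    (h : List.lookup n edges.1 = some s) : s.length ≤ pvS edges := by
  unfold pvS; exact pv_lookup_len h

-- the 'while stack:' loop of A; the Python list-stack is held TOP-FIRST (stack.pop() = head,
-- stack.extend(successors) = successors.reverse ++ rest)
def pvLoop (edges : (List (Int × List Int)) × (List (Int × List Int))) (visited : PySem.Set Int)
    (stack : List Int) (tree : List (Int × List Int)) : PySem.Set Int × List (Int × List Int) :=
  match stack with
  | [] => (visited, tree)
  | node :: rest =>
    if PySem.Set.contains visited node then
      pvLoop edges visited rest tree
    else
      let visited' := PySem.Set.add visited node
      let successors := pvFindSuccessors node edges false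
      let tree' := if successors.length ≠ 0 then tree ++ [(node, successors)] else tree
      pvLoop edges visited' (successors.reverse ++ rest) tree'
termination_by pvU edges visited * (pvS edges + 1) + stack.length
decreasing_by
· simp only [List.length_cons]; omega
· have hle := pvU_add_le edges visited node
  by_cases hs : pvFindSuccessors node edges false = []
  · have h1 : pvU edges (PySem.Set.add visited node) * (pvS edges + 1) ≤ pvU edges visited * (pvS edges + 1) :=
      Nat.mul_le_mul_right _ hle
    simp only [hs, List.reverse_nil, List.nil_append, List.length_cons]
    omega
  · cases hl : List.lookup node edges.1 with
    | none => exact absurd (show pvFindSuccessors node edges false = [] by simp [pvFindSuccessors, hl]) hs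
    | some s =>
      have hmem := pv_lookup_mem_keys hl
      have hnv : node ∉ visited := by
        intro hm
        have hcv : PySem.Set.contains visited node = true := (PySem.Set.contains_iff visited node).mpr hm
        exact ‹¬ PySem.Set.contains visited node = true› hcv
      have hlt := pvU_add_lt edges visited node hmem hnv
      have hlen : (pvFindSuccessors node edges false).length ≤ pvS edges := by
        simp only [pvFindSuccessors, hl, PySem.List.length_sorted]
        exact pv_lookup_len_le hl
      have h2 : (pvU edges (PySem.Set.add visited node) + 1) * (pvS edges + 1) ≤ pvU edges visited * (pvS edges + 1) :=
        Nat.mul_le_mul_right _ hlt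
      rw [Nat.add_mul, Nat.one_mul] at h2
      simp only [List.length_append, List.length_reverse, List.length_cons]
      omega

def get_successor_tree_py (start_id : Int) (edges : (List (Int × List Int)) × (List (Int × List Int))) : List (Int × List Int) :=
  (pvLoop edges PySem.Set.empty [start_id] []).2

-- ===== PORT B =====
-- recursive DFS 'visit(node)' of Source B; the fuel argument only makes the recursion total
-- (recursion depth never exceeds the number of unvisited keys + 1, see pvVisitStab below)
def pvVisit (edges : (List (Int × List Int)) × (List (Int × List Int))) (fuel : Nat) (node : Int)
    (st : PySem.Set Int × List (Int × List Int)) : PySem.Set Int × List (Int × List Int) :=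
  match fuel with
  | 0 => st
  | f + 1 =>
    if PySem.Set.contains st.1 node then st
    else
      let visited := PySem.Set.add st.1 node
      let successors := pvFindSuccessors node edges false
      let tree := if successors ≠ [] then st.2 ++ [(node, successors)] else st.2
      successors.reverse.foldl (fun s c => pvVisit edges f c s) (visited, tree)

def get_successor_tree_py_alt (start_id : Int) (edges : (List (Int × List Int)) × (List (Int × List Int))) : List (Int × List Int) :=
  (pvVisit edges (edges.1.length + 1) start_id (PySem.Set.empty, [])).2

-- ===== PRECONDITION & SPEC =====
def Spec_get_successor_tree_py (start_id : Int) (edges : (List (Int × List Int)) × (List (Int × List Int))) (out : List (Int × List Int)) : Prop := out = get_successor_tree_py_alt start_id edges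
instance (start_id : Int) (edges : (List (Int × List Int)) × (List (Int × List Int))) (out : List (Int × List Int)) : Decidable (Spec_get_successor_tree_py start_id edges out) := by unfold Spec_get_successor_tree_py; infer_instance

-- ===== CLAIM (what is proved, stated in full; the proofs are below) =====
def Claim_equal_get_successor_tree_py : Prop := ∀ (start_id : Int) (edges : (List (Int × List Int)) × (List (Int × List Int))), Dom_get_successor_tree_py start_id edges → Spec_get_successor_tree_py start_id edges (get_successor_tree_py start_id edges)

-- ===== LEMMAS AND PROOFS =====

lemma pvU_le (edges : (List (Int × List Int)) × (List (Int × List Int))) (v : PySem.Set Int) :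
    pvU edges v ≤ edges.1.length := by
  calc pvU edges v ≤ (pvKeys edges).length := List.length_filter_le _ _
    _ = edges.1.length := List.length_map ..

-- visiting never un-marks a node: pvU is monotone along pvVisit
lemma pvVisitU (edges : (List (Int × List Int)) × (List (Int × List Int))) :
    ∀ (f : Nat) (n : Int) (st : PySem.Set Int × List (Int × List Int)),
      pvU edges (pvVisit edges f n st).1 ≤ pvU edges st.1 := by
  intro f
  induction f with
  | zero => intro n st; simp [pvVisit]
  | succ f ih =>
    intro n st
    have hfold : ∀ (l : List Int) (st' : PySem.Set Int × List (Int × List Int)),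
        pvU edges (l.foldl (fun s c => pvVisit edges f c s) st').1 ≤ pvU edges st'.1 := by
      intro l
      induction l with
      | nil => intro st'; simp
      | cons c t iht =>
        intro st'
        simp only [List.foldl_cons]
        exact le_trans (iht _) (ih c st')
    rw [pvVisit]
    by_cases hc : PySem.Set.contains st.1 n
    · rw [if_pos hc]
    · rw [if_neg hc]
      exact le_trans (hfold _ _) (pvU_add_le edges st.1 n)

-- the fuel argument is irrelevant as soon as it exceeds the number of unvisited keys
lemma pvVisitStab (edges : (List (Int × List Int)) × (List (Int × List Int))) :
    ∀ (a b : Nat) (n : Int) (st : PySem.Set Int × List (Int × List Int)),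
      pvU edges st.1 < a → pvU edges st.1 < b → pvVisit edges a n st = pvVisit edges b n st := by
  intro a
  induction a with
  | zero => intro b n st ha _; exact absurd ha (Nat.not_lt_zero _)
  | succ a ih =>
    intro b n st ha hb
    cases b with
    | zero => exact absurd hb (Nat.not_lt_zero _)
    | succ b =>
      rw [pvVisit, pvVisit]
      by_cases hc : PySem.Set.contains st.1 n
      · rw [if_pos hc, if_pos hc]
      · rw [if_neg hc, if_neg hc]
        by_cases hs : pvFindSuccessors n edges false = []
        · simp [hs]
        · cases hl : List.lookup n edges.1 with
          | none => exact absurd (show pvFindSuccessors n edges false = [] by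
              simp [pvFindSuccessors, hl]) hs
          | some s =>
            have hmem := pv_lookup_mem_keys hl
            have hnv : n ∉ st.1 := fun hm => hc ((PySem.Set.contains_iff st.1 n).mpr hm)
            have hlt := pvU_add_lt edges st.1 n hmem hnv
            have hfold : ∀ (l : List Int) (st' : PySem.Set Int × List (Int × List Int)),
                pvU edges st'.1 < a → pvU edges st'.1 < b →
                l.foldl (fun s c => pvVisit edges a c s) st' =
                  l.foldl (fun s c => pvVisit edges b c s) st' := by
              intro l
              induction l with
              | nil => intro st' _ _; simp
              | cons c t iht =>
                intro st' h1 h2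
                simp only [List.foldl_cons]
                rw [ih b c st' h1 h2]
                exact iht _ (lt_of_le_of_lt (pvVisitU edges b c st') h1)
                  (lt_of_le_of_lt (pvVisitU edges b c st') h2)
            exact hfold _ _ (lt_of_lt_of_le hlt (Nat.lt_succ_iff.mp ha))
              (lt_of_lt_of_le hlt (Nat.lt_succ_iff.mp hb))

lemma pvFoldStab (edges : (List (Int × List Int)) × (List (Int × List Int))) (a b : Nat) :
    ∀ (l : List Int) (st : PySem.Set Int × List (Int × List Int)),
      pvU edges st.1 < a → pvU edges st.1 < b →
      l.foldl (fun s c => pvVisit edges a c s) st = l.foldl (fun s c => pvVisit edges b c s) st := by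
  intro l
  induction l with
  | nil => intro st _ _; simp
  | cons c t iht =>
    intro st h1 h2
    simp only [List.foldl_cons]
    rw [pvVisitStab edges a b c st h1 h2]
    exact iht _ (lt_of_le_of_lt (pvVisitU edges b c st) h1)
      (lt_of_le_of_lt (pvVisitU edges b c st) h2)

-- A's loop over the whole stack is B's visit folded over the stack (top-first)
lemma pvMain (edges : (List (Int × List Int)) × (List (Int × List Int))) (fuel : Nat) :
    ∀ (k : Nat) (stack : List Int) (v : PySem.Set Int) (t : List (Int × List Int)),
      pvU edges v * (pvS edges + 1) + stack.length ≤ k → pvU edges v < fuel →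
      pvLoop edges v stack t = stack.foldl (fun st n => pvVisit edges fuel n st) (v, t) := by
  intro k
  induction k with
  | zero =>
    intro stack v t hk _
    have hst : stack = [] := List.length_eq_zero_iff.mp (by omega)
    subst hst
    rw [pvLoop]
    rfl
  | succ k ih =>
    intro stack v t hk hf
    match stack with
    | [] => rw [pvLoop]; rfl
    | node :: rest =>
      obtain ⟨f, rfl⟩ : ∃ f, fuel = f + 1 := ⟨fuel - 1, by omega⟩
      rw [pvLoop]
      simp only [List.foldl_cons]
      by_cases hc : PySem.Set.contains v node
      · rw [if_pos hc]
        have hv1 : pvVisit edges (f + 1) node (v, t) = (v, t) := by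
          rw [pvVisit, if_pos hc]
        rw [hv1]
        exact ih rest v t (by simp only [List.length_cons] at hk; omega) hf
      · rw [if_neg hc]
        have hv1 : pvVisit edges (f + 1) node (v, t) =
            (pvFindSuccessors node edges false).reverse.foldl (fun s c => pvVisit edges f c s)
              (PySem.Set.add v node,
               if pvFindSuccessors node edges false ≠ [] then t ++ [(node, pvFindSuccessors node edges false)] else t) := by
          rw [pvVisit, if_neg hc]
        by_cases hs : pvFindSuccessors node edges false = []
        · -- no successors: nothing pushed, nothing appended
          have hle := pvU_add_le edges v node
          have hmul : pvU edges (PySem.Set.add v node) * (pvS edges + 1) ≤ pvU edges v * (pvS edges + 1) :=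
            Nat.mul_le_mul_right _ hle
          rw [hv1]
          simp only [hs, List.reverse_nil, List.nil_append, List.foldl_nil, List.length_nil,
            ne_eq, not_true_eq_false, if_false]
          exact ih rest (PySem.Set.add v node) t (by simp only [List.length_cons] at hk; omega)
            (lt_of_le_of_lt hle hf)
        · cases hl : List.lookup node edges.1 with
          | none => exact absurd (show pvFindSuccessors node edges false = [] by
              simp [pvFindSuccessors, hl]) hs
          | some s =>
            have hmem := pv_lookup_mem_keys hl
            have hnv : node ∉ v := fun hm => hc ((PySem.Set.contains_iff v node).mpr hm)
            have hlt := pvU_add_lt edges v node hmem hnv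
            have hlen : (pvFindSuccessors node edges false).length ≤ pvS edges := by
              simp only [pvFindSuccessors, hl, PySem.List.length_sorted]
              exact pv_lookup_len_le hl
            have htree : (if (pvFindSuccessors node edges false).length ≠ 0 then
                t ++ [(node, pvFindSuccessors node edges false)] else t) =
                t ++ [(node, pvFindSuccessors node edges false)] := by
              simp [List.length_eq_zero_iff, hs]
            set tr := t ++ [(node, pvFindSuccessors node edges false)] with htr
            have hbound : pvU edges (PySem.Set.add v node) * (pvS edges + 1) +
                ((pvFindSuccessors node edges false).reverse ++ rest).length ≤ k := by
              have h2 : (pvU edges (PySem.Set.add v node) + 1) * (pvS edges + 1) ≤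
                  pvU edges v * (pvS edges + 1) := Nat.mul_le_mul_right _ hlt
              rw [Nat.add_mul, Nat.one_mul] at h2
              simp only [List.length_append, List.length_reverse, List.length_cons] at *
              omega
            -- unfold one loop step and apply the IH to the extended stack
            rw [htree]
            rw [ih ((pvFindSuccessors node edges false).reverse ++ rest) (PySem.Set.add v node) tr
              hbound (lt_of_le_of_lt (pvU_add_le edges v node) hf)]
            rw [List.foldl_append, hv1]
            have htree2 : (if pvFindSuccessors node edges false ≠ [] then
                t ++ [(node, pvFindSuccessors node edges false)] else t) = tr := by
              simp [hs, htr]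
            rw [htree2]
            congr 1
            have hUf : pvU edges v ≤ f := Nat.lt_succ_iff.mp hf
            exact pvFoldStab edges (f + 1) f ((pvFindSuccessors node edges false).reverse)
              (PySem.Set.add v node, tr) (lt_trans hlt hf) (lt_of_lt_of_le hlt hUf)

-- ===== VERDICT (by name: the statement is the Claim_ definition above) =====
theorem get_successor_tree_py_spec : Claim_equal_get_successor_tree_py := by
  intro start_id edges _
  show get_successor_tree_py start_id edges = get_successor_tree_py_alt start_id edges
  unfold get_successor_tree_py get_successor_tree_py_alt
  rw [pvMain edges (edges.1.length + 1) (pvU edges PySem.Set.empty * (pvS edges + 1) + 1)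
    [start_id] PySem.Set.empty [] (le_refl _) (by have := pvU_le edges PySem.Set.empty; omega)]
  simp only [List.foldl_cons, List.foldl_nil]
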